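-- pv_equiv track=rewrite | github.com/yellalingh-margonda/Python-DSA | two_pointer/007_number_of_substring_3_character.py | substring_count_brut
-- ===== SOURCE A (Python) =====
-- def substring_count_brut(s):
--     count, n = 0, len(s)
--
--     for i in range(n):
--         hash_map = {}
--         for j in range(i, n):
--             hash_map[s[j]] = 1  # or any value
--             if len(hash_map) == 3:
--                 count += 1
--             elif len(hash_map) > 3:
--                 break
--
--     return count
-- ===== SOURCE B (Python) =====
-- def substring_count_brut(s):
--     # One pass over right endpoints: a dict of last-occurrence indices; the
--     # number of starts i making s[i..j] have exactly 3 distinct characters is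
--     # (3rd largest last index) - (4th largest last index, or -1).
--     count = 0
--     last = {}
--     for j, c in enumerate(s):
--         last[c] = j
--         if len(last) >= 3:
--             vals = sorted(last.values(), reverse=True)
--             count += vals[2] - (vals[3] if len(vals) > 3 else -1)
--     return count
-- ===== Notes on version B (the rewrite author's own statement) =====
-- stated objective: faster
-- what changed: Replaced the per-start rescanning loop (restart a dict of seen characters for every start index) by a single left-to-right pass over right endpoints that maintains a dict of last-occurrence indices and, from the 3rd and 4th largest last indices, counts in O(1) the starts whose window has exactly 3 distinct characters.
import Mathlib
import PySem

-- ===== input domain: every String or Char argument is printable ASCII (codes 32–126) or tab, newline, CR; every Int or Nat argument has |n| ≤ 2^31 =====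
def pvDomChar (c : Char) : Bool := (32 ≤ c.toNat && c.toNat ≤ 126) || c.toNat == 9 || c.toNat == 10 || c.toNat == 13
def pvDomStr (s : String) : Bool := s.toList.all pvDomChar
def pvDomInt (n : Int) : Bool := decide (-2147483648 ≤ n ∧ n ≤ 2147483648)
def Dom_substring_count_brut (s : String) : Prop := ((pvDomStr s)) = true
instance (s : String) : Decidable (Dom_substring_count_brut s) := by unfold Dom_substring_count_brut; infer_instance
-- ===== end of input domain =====

-- B replaces A's per-start rescans by one pass over right endpoints keeping last-occurrence
-- indices (counting starts from the 3rd/4th largest last index), which avoids A's quadratic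
-- behaviour on strings with few distinct characters.

-- ===== PORT A =====
-- inner loop 'for j in range(i, n)' ported as structural recursion over the suffix s[i:];
-- 'break' = stop the recursion and return count
def aInner : List Char → PySem.Dict Char Int → Int → Int
  | [], _, count => count
  | ch :: rest, hm, count =>
    let hm' := hm.insert ch 1
    if hm'.size = 3 then aInner rest hm' (count + 1)
    else if hm'.size > 3 then count
    else aInner rest hm' count

def substring_count_brut (s : String) : Int :=
  (List.range s.toList.length).foldl
    (fun count i => aInner (s.toList.drop i) PySem.Dict.empty count) 0

-- ===== PORT B =====
-- one step of B's 'for j, c in enumerate(s)' loop; state = (count, last-occurrence dict).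
-- vals[2]/vals[3] are read with pyGetD: the guards 'len(last) >= 3' / 'len(vals) > 3' put the
-- indices in range, so this equals Python's vals[2]/vals[3] exactly where they are evaluated.
def bStep (st : Int × PySem.Dict Char Int) (p : Int × Char) : Int × PySem.Dict Char Int :=
  let last := st.2.insert p.2 p.1
  if 3 ≤ last.size then
    let vals := PySem.List.sorted last.values (fun v => v) true
    (st.1 + (PySem.List.pyGetD vals 2 0
             - (if 3 < vals.length then PySem.List.pyGetD vals 3 0 else -1)), last)
  else (st.1, last)

def substring_count_brut_alt (s : String) : Int :=
  ((PySem.List.enumerate s.toList 0).foldl bStep (0, PySem.Dict.empty)).1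

-- ===== PRECONDITION & SPEC =====
def Spec_substring_count_brut (s : String) (out : Int) : Prop := out = substring_count_brut_alt s
instance (s : String) (out : Int) : Decidable (Spec_substring_count_brut s out) := by unfold Spec_substring_count_brut; infer_instance

-- ===== CLAIM (what is proved, stated in full; the proofs are below) =====
def Claim_equal_substring_count_brut : Prop := ∀ (s : String), Dom_substring_count_brut s → Spec_substring_count_brut s (substring_count_brut s)

-- ===== LEMMAS AND PROOFS =====

-- window predicate: the substring s[i..j] (inclusive) has exactly 3 distinct characters
def winQ (l : List Char) (i j : Nat) : Bool :=
  decide (((l.drop i).take (j + 1 - i)).toFinset.card = 3)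

-- A's total, right ends indexed as i + m
def cntA (l : List Char) : Nat :=
  ((List.range l.length).map
    (fun i => (List.range (l.length - i)).countP (fun m => winQ l i (i + m)))).sum

-- B's total, grouped by right end j
def cntB (l : List Char) : Nat :=
  ((List.range l.length).map
    (fun j => (List.range (j + 1)).countP (fun i => winQ l i j))).sum

-- the last-occurrence dict built by B over the prefix processed so far
def lastD (l : List Char) : PySem.Dict Char Int :=
  (PySem.List.enumerate l 0).foldl (fun d p => d.insert p.2 p.1) PySem.Dict.empty

-- index of the last occurrence of ch in l (meaningful when ch ∈ l)
def lastN (l : List Char) (ch : Char) : Nat := l.length - 1 - l.reverse.idxOf ch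

-- ---- generic counting helpers ----

theorem countP_congr_mem {α : Type} (l : List α) (p q : α → Bool)
    (h : ∀ x ∈ l, p x = q x) : l.countP p = l.countP q := by
  induction l with
  | nil => rfl
  | cons a t ih =>
    simp only [List.countP_cons, h a List.mem_cons_self,
      ih (fun x hx => h x (List.mem_cons_of_mem a hx))]

theorem sum_map_add' {α : Type} (l : List α) (f g : α → Nat) :
    (l.map (fun x => f x + g x)).sum = (l.map f).sum + (l.map g).sum := by
  induction l with
  | nil => rfl
  | cons a t ih => simp only [List.map_cons, List.sum_cons, ih]; omega

theorem countP_eq_sum_map {α : Type} (l : List α) (p : α → Bool) :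
    l.countP p = (l.map (fun x => if p x then 1 else 0)).sum := by
  induction l with
  | nil => rfl
  | cons a t ih => simp only [List.countP_cons, List.map_cons, List.sum_cons, ih]; omega

theorem sum_map_natCast {α : Type} (l : List α) (f : α → Nat) :
    ((l.map (fun x => ((f x : Nat) : Int))).sum) = (((l.map f).sum : Nat) : Int) := by
  induction l with
  | nil => rfl
  | cons a t ih => simp only [List.map_cons, List.sum_cons, ih]; push_cast; ring

theorem countP_sub {α : Type} (l : List α) (p q : α → Bool)
    (himp : ∀ x, q x = true → p x = true) :
    l.countP (fun x => p x && !q x) = l.countP p - l.countP q := by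
  induction l with
  | nil => rfl
  | cons a t ih =>
    have hle : t.countP q ≤ t.countP p :=
      List.countP_mono_left (fun x _ hq => himp x hq)
    simp only [List.countP_cons, ih]
    by_cases hq : q a = true
    · simp [hq, himp a hq]
    · simp only [Bool.not_eq_true] at hq
      cases hp : p a
      · simp [hq]
      · simp [hq]
        omega

-- count of i < m with (i : Int) ≤ w
theorem countP_range_le (m : Nat) (w : Int) (h0 : 0 ≤ w) (hm : w.toNat < m) :
    (List.range m).countP (fun (i : Nat) => decide ((i : Int) ≤ w)) = w.toNat + 1 := by
  induction m with
  | zero => omega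
  | succ m ih =>
    rw [List.range_succ, List.countP_append]
    by_cases hmw : w.toNat < m
    · rw [ih hmw]
      have hnot : ¬ ((m : Int) ≤ w) := by omega
      simp [hnot]
    · have hmeq : w.toNat = m := by omega
      have hall : (List.range m).countP (fun (i : Nat) => decide ((i : Int) ≤ w)) = m := by
        have h := List.countP_eq_length (l := List.range m)
          (p := fun i => decide ((i : Int) ≤ w))
        rw [List.length_range] at h
        apply h.mpr
        intro a ha
        have : a < m := List.mem_range.mp ha
        simp only [decide_eq_true_iff]
        omega
      have hok : ((m : Int) ≤ w) := by omega
      simp [hall, hok, hmeq]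

-- for a descending-sorted list, 'at least k+1 elements are ≥ i' iff the (k+1)-st is ≥ i
theorem sortedDesc_countP_ge_iff (vs : List Int) (h : vs.Pairwise (fun a b => b ≤ a))
    (k : Nat) (hk : k < vs.length) (i : Int) :
    (k + 1 ≤ vs.countP (fun v => decide (i ≤ v))) ↔ i ≤ vs[k] := by
  have hpg := List.pairwise_iff_getElem.mp h
  constructor
  · intro hc
    by_contra hlt
    have hvk : vs[k] < i := by omega
    have hsplit : vs.countP (fun v => decide (i ≤ v)) =
        (vs.take k).countP (fun v => decide (i ≤ v)) +
        (vs.drop k).countP (fun v => decide (i ≤ v)) := by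
      conv_lhs => rw [← List.take_append_drop k vs]
      rw [List.countP_append]
    have hdrop0 : (vs.drop k).countP (fun v => decide (i ≤ v)) = 0 := by
      apply List.countP_eq_zero.mpr
      intro v hv
      obtain ⟨m, hm, rfl⟩ := List.mem_iff_getElem.mp hv
      rw [List.getElem_drop]
      have hkm : k + m < vs.length := by
        have := List.length_drop (i := k) (l := vs); omega
      have hle : vs[k + m] ≤ vs[k] := by
        rcases Nat.eq_zero_or_pos m with hm0 | hm0
        · have hkk : k + m = k := by omega
          exact le_of_eq (by congr 1)
        · exact hpg k (k + m) hk hkm (by omega)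
      simp only [decide_eq_true_iff]
      omega
    have htk : (vs.take k).countP (fun v => decide (i ≤ v)) ≤ k := by
      have h1 := List.countP_le_length (l := vs.take k) (p := fun v => decide (i ≤ v))
      have h2 : (vs.take k).length ≤ k := by
        rw [List.length_take]; omega
      omega
    omega
  · intro hi
    have hlt : (vs.take (k + 1)).length = k + 1 := by
      rw [List.length_take]; omega
    have htake : (vs.take (k + 1)).countP (fun v => decide (i ≤ v)) = k + 1 := by
      have hall : ∀ v ∈ vs.take (k + 1), decide (i ≤ v) = true := by
        intro v hv
        obtain ⟨m, hm, rfl⟩ := List.mem_iff_getElem.mp hv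
        rw [List.getElem_take]
        have hmlen : m < vs.length := by
          rw [hlt] at hm
          omega
        have hle : vs[k] ≤ vs[m] := by
          rw [hlt] at hm
          rcases Nat.lt_or_ge m k with hmk | hmk
          · exact hpg m k hmlen hk hmk
          · have hmkk : m = k := by omega
            subst hmkk; exact le_refl _
        simp only [decide_eq_true_iff]
        omega
      rw [List.countP_eq_length.mpr hall, hlt]
    have hsplit : vs.countP (fun v => decide (i ≤ v)) =
        (vs.take (k+1)).countP (fun v => decide (i ≤ v)) +
        (vs.drop (k+1)).countP (fun v => decide (i ≤ v)) := by
      conv_lhs => rw [← List.take_append_drop (k+1) vs]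
      rw [List.countP_append]
    omega

-- ---- last-occurrence facts ----

theorem lastN_lt (l : List Char) (ch : Char) (hc : ch ∈ l) : lastN l ch < l.length := by
  have : l.length ≠ 0 := by
    intro h0; rw [List.length_eq_zero_iff] at h0; subst h0; cases hc
  unfold lastN; omega

theorem getElem_lastN (l : List Char) (ch : Char) (hc : ch ∈ l) :
    l[lastN l ch]'(lastN_lt l ch hc) = ch := by
  have hmem : ch ∈ l.reverse := by simpa using hc
  have hk : l.reverse.idxOf ch < l.reverse.length := List.idxOf_lt_length_of_mem hmem
  have h1 : l.reverse[l.reverse.idxOf ch] = ch := List.getElem_idxOf hk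
  rw [List.getElem_reverse] at h1
  exact h1

theorem idxOf_le_of_getElem (l : List Char) (c : Char) (k : Nat) (hk : k < l.length)
    (h : l[k] = c) : l.idxOf c ≤ k := by
  induction l generalizing k with
  | nil => simp at hk
  | cons a t ih =>
    by_cases hac : a = c
    · subst hac; simp [List.idxOf_cons_self]
    · have hidx : List.idxOf c (a :: t) = (List.idxOf c t).succ :=
        List.idxOf_cons_ne t hac
      cases k with
      | zero => simp at h; exact absurd h hac
      | succ k' =>
        rw [hidx]
        have hk' : k' < t.length := by simp at hk; omega
        have h' : t[k'] = c := by simpa using h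
        exact Nat.succ_le_succ (ih k' hk' h')

theorem lastN_maximal (l : List Char) (ch : Char) (hc : ch ∈ l) (m : Nat)
    (hm : m < l.length) (h : l[m] = ch) : m ≤ lastN l ch := by
  have hmem : ch ∈ l.reverse := by simpa using hc
  have hk : l.reverse.idxOf ch < l.reverse.length := List.idxOf_lt_length_of_mem hmem
  rw [List.length_reverse] at hk
  have hrev : l.reverse[l.length - 1 - m]'(by rw [List.length_reverse]; omega) = ch := by
    rw [List.getElem_reverse]
    have heq : l.length - 1 - (l.length - 1 - m) = m := by omega
    simp only [heq]
    exact h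
  have hle : l.reverse.idxOf ch ≤ l.length - 1 - m :=
    idxOf_le_of_getElem l.reverse ch (l.length - 1 - m)
      (by rw [List.length_reverse]; omega) hrev
  unfold lastN
  omega

theorem mem_drop_iff_lastN (l : List Char) (ch : Char) (i : Nat) :
    ch ∈ l.drop i ↔ ch ∈ l ∧ i ≤ lastN l ch := by
  constructor
  · intro h
    obtain ⟨m, hm, he⟩ := List.mem_iff_getElem.mp h
    rw [List.getElem_drop] at he
    have hlen : i + m < l.length := by
      have := List.length_drop (i := i) (l := l); omega
    have hmem : ch ∈ l := he ▸ List.getElem_mem hlen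
    have := lastN_maximal l ch hmem (i + m) hlen he
    exact ⟨hmem, by omega⟩
  · rintro ⟨hmem, hle⟩
    have hlt := lastN_lt l ch hmem
    apply List.mem_iff_getElem.mpr
    refine ⟨lastN l ch - i, by rw [List.length_drop]; omega, ?_⟩
    rw [List.getElem_drop]
    have heq : i + (lastN l ch - i) = lastN l ch := by omega
    simp only [heq]
    exact getElem_lastN l ch hmem

theorem lastN_append_self (l : List Char) (c : Char) : lastN (l ++ [c]) c = l.length := by
  unfold lastN
  rw [List.reverse_concat, List.idxOf_cons_self]
  simp

theorem lastN_append_ne (l : List Char) (c ch : Char) (h : ch ≠ c) :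
    lastN (l ++ [c]) ch = lastN l ch := by
  unfold lastN
  rw [List.reverse_concat, List.idxOf_cons_ne _ (fun hc => h hc.symm)]
  simp only [List.length_append, List.length_cons, List.length_nil, Nat.succ_eq_add_one]
  omega

-- ---- the dict built by B ----

theorem lastD_append (l : List Char) (c : Char) :
    lastD (l ++ [c]) = (lastD l).insert c (l.length : Int) := by
  unfold lastD
  rw [PySem.List.enumerate_append, List.foldl_append]
  simp [PySem.List.enumerate_cons, PySem.List.enumerate_nil]

theorem keys_lastD (l : List Char) : (lastD l).keys = PySem.Set.ofList l := by
  unfold lastD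
  rw [PySem.Dict.keys_foldl_insert_key (PySem.List.enumerate l 0) (fun p => p.2)
    (fun _ p => p.1) PySem.Dict.empty]
  rw [PySem.Dict.keys_empty, PySem.List.map_snd_enumerate, PySem.Set.update_nil_left]

theorem nodup_keys_lastD (l : List Char) : (lastD l).keys.Nodup := by
  rw [keys_lastD]; exact PySem.Set.nodup_ofList l

theorem get?_lastD (l : List Char) (ch : Char) :
    (lastD l).get? ch = if ch ∈ l then some ((lastN l ch : Nat) : Int) else none := by
  induction l using List.reverseRecOn with
  | nil => simp [lastD, PySem.List.enumerate_nil, PySem.Dict.get?_empty]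
  | append_singleton l c ih =>
    rw [lastD_append, PySem.Dict.get?_insert]
    by_cases hc : ch = c
    · subst hc
      rw [if_pos rfl, if_pos (by simp), lastN_append_self]
    · rw [if_neg hc, ih, lastN_append_ne l c ch hc]
      by_cases hm : ch ∈ l
      · rw [if_pos hm, if_pos (by simp [hm])]
      · rw [if_neg hm, if_neg (by simp [hm, hc])]

-- ---- the per-right-end contribution ----

theorem step_core (L : List Char) (hL : L ≠ []) :
    (if 3 ≤ (lastD L).size then
       PySem.List.pyGetD (PySem.List.sorted (lastD L).values (fun v => v) true) 2 0 -
         (if 3 < (PySem.List.sorted (lastD L).values (fun v => v) true).length then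
            PySem.List.pyGetD (PySem.List.sorted (lastD L).values (fun v => v) true) 3 0
          else -1)
     else 0)
    = (((List.range L.length).countP (fun i => winQ L i (L.length - 1))) : Int) := by
  have hnd := nodup_keys_lastD L
  have hkeys := keys_lastD L
  set d := lastD L with hd
  set vals := PySem.List.sorted d.values (fun v => v) true with hvals
  have hmemkeys : ∀ ch, ch ∈ d.keys ↔ ch ∈ L := by
    intro ch; rw [hkeys]; exact PySem.Set.mem_ofList L ch
  have hvmap : d.values = d.keys.map (fun ch => ((lastN L ch : Nat) : Int)) := by
    rw [PySem.Dict.values_eq_map_keys d hnd 0]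
    apply List.map_congr_left
    intro ch hch
    rw [PySem.Dict.getD_eq_get?_getD, hd, get?_lastD, if_pos ((hmemkeys ch).mp hch)]
    rfl
  have hlenv : vals.length = d.keys.length := by
    rw [hvals, PySem.List.length_sorted, hvmap, List.length_map]
  have hsize : d.size = d.keys.length := by
    simp [PySem.Dict.size, PySem.Dict.keys]
  have hperm : vals.Perm d.values := PySem.List.sorted_perm d.values (fun v => v) true
  have hdesc : vals.Pairwise (fun a b => b ≤ a) :=
    PySem.List.sorted_pairwise_rev d.values (fun v => v)
  have hbound : ∀ v ∈ vals, 0 ≤ v ∧ v.toNat < L.length := by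
    intro v hv
    have hv2 : v ∈ d.values := hperm.mem_iff.mp hv
    rw [hvmap] at hv2
    obtain ⟨ch, hch, rfl⟩ := List.mem_map.mp hv2
    have hm : ch ∈ L := (hmemkeys ch).mp hch
    have := lastN_lt L ch hm
    exact ⟨by positivity, by simpa using this⟩
  have hg : ∀ i, i < L.length →
      (L.drop i).toFinset.card = vals.countP (fun v => decide ((i : Int) ≤ v)) := by
    intro i _
    have h1 : vals.countP (fun v => decide ((i : Int) ≤ v)) =
        d.values.countP (fun v => decide ((i : Int) ≤ v)) := hperm.countP_eq _
    have h2 : d.values.countP (fun v => decide ((i : Int) ≤ v)) =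
        d.keys.countP (fun ch => decide (i ≤ lastN L ch)) := by
      rw [hvmap, List.countP_map]
      apply countP_congr_mem
      intro ch _
      simp only [Function.comp_apply, decide_eq_decide]
      omega
    have h3 : d.keys.countP (fun ch => decide (i ≤ lastN L ch)) =
        (d.keys.filter (fun ch => decide (i ≤ lastN L ch))).length :=
      List.countP_eq_length_filter
    have h4 : (L.drop i).toFinset =
        (d.keys.filter (fun ch => decide (i ≤ lastN L ch))).toFinset := by
      ext x
      simp only [List.mem_toFinset, List.mem_filter, decide_eq_true_iff, hmemkeys]
      exact mem_drop_iff_lastN L x i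
    have h5 : (d.keys.filter (fun ch => decide (i ≤ lastN L ch))).toFinset.card =
        (d.keys.filter (fun ch => decide (i ≤ lastN L ch))).length :=
      List.toFinset_card_of_nodup (hnd.filter _)
    rw [h1, h2, h3, ← h5, h4]
  have hwin : (List.range L.length).countP (fun i => winQ L i (L.length - 1)) =
      (List.range L.length).countP
        (fun (i : Nat) => decide (vals.countP (fun v => decide ((i : Int) ≤ v)) = 3)) := by
    apply countP_congr_mem
    intro i hi
    have hiL : i < L.length := List.mem_range.mp hi
    have hlen0 : L.length ≠ 0 := by
      intro h0; rw [List.length_eq_zero_iff] at h0; exact hL h0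
    have hlen1 : L.length - 1 + 1 = L.length := by omega
    have htake : (L.drop i).take (L.length - 1 + 1 - i) = L.drop i := by
      rw [hlen1]
      apply List.take_of_length_le
      rw [List.length_drop]
    unfold winQ
    rw [htake, hg i hiL]
  rw [hwin]
  have hsplit3 : (List.range L.length).countP
      (fun (i : Nat) => decide (vals.countP (fun v => decide ((i : Int) ≤ v)) = 3)) =
      (List.range L.length).countP
        (fun (i : Nat) => decide (3 ≤ vals.countP (fun v => decide ((i : Int) ≤ v)))) -
      (List.range L.length).countP
        (fun (i : Nat) => decide (4 ≤ vals.countP (fun v => decide ((i : Int) ≤ v)))) := by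
    rw [← countP_sub (List.range L.length)
        (fun (i : Nat) => decide (3 ≤ vals.countP (fun v => decide ((i : Int) ≤ v))))
        (fun (i : Nat) => decide (4 ≤ vals.countP (fun v => decide ((i : Int) ≤ v))))
        (fun i h => by simp only [decide_eq_true_iff] at h ⊢; omega)]
    apply countP_congr_mem
    intro i _
    have hx : ∀ (x : Nat), decide (x = 3) = (decide (3 ≤ x) && ! decide (4 ≤ x)) := by
      intro x
      by_cases h : x = 3
      · subst h; simp
      · by_cases h2 : x < 3
        · have h3 : ¬ (3 ≤ x) := by omega
          simp [h, h3]
        · have h3 : 3 ≤ x := by omega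
          have h4 : 4 ≤ x := by omega
          simp [h, h3, h4]
    exact hx _
  rw [hsplit3]
  by_cases h3 : 3 ≤ d.size
  · rw [if_pos h3]
    have h2v : 2 < vals.length := by omega
    have hv2 := hbound _ (List.getElem_mem h2v)
    have hge3 : (List.range L.length).countP
        (fun (i : Nat) => decide (3 ≤ vals.countP (fun v => decide ((i : Int) ≤ v)))) =
        (vals[2]'h2v).toNat + 1 := by
      rw [countP_congr_mem _ _ (fun (i : Nat) => decide ((i : Int) ≤ vals[2]'h2v)) (fun i _ => by
        simp only [decide_eq_decide]
        exact sortedDesc_countP_ge_iff vals hdesc 2 h2v (i : Int))]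
      exact countP_range_le L.length _ hv2.1 hv2.2
    have hpg2 : PySem.List.pyGetD vals 2 0 = vals[2]'h2v := by
      rw [PySem.List.pyGetD_eq_getElem vals 0 (by norm_num) (by exact_mod_cast h2v)]
      simp
    rw [hge3, hpg2]
    by_cases h4 : 3 < vals.length
    · rw [if_pos h4]
      have hv3 := hbound _ (List.getElem_mem h4)
      have hge4 : (List.range L.length).countP
          (fun (i : Nat) => decide (4 ≤ vals.countP (fun v => decide ((i : Int) ≤ v)))) =
          (vals[3]'h4).toNat + 1 := by
        rw [countP_congr_mem _ _ (fun (i : Nat) => decide ((i : Int) ≤ vals[3]'h4)) (fun i _ => by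
          simp only [decide_eq_decide]
          exact sortedDesc_countP_ge_iff vals hdesc 3 h4 (i : Int))]
        exact countP_range_le L.length _ hv3.1 hv3.2
      have hpg3 : PySem.List.pyGetD vals 3 0 = vals[3]'h4 := by
        rw [PySem.List.pyGetD_eq_getElem vals 0 (by norm_num) (by exact_mod_cast h4)]
        simp
      have hle32 : vals[3]'h4 ≤ vals[2]'h2v :=
        List.pairwise_iff_getElem.mp hdesc 2 3 h2v h4 (by omega)
      rw [hge4, hpg3]
      have e2 : 0 ≤ vals[2]'h2v := hv2.1
      have e3 : 0 ≤ vals[3]'h4 := hv3.1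
      omega
    · rw [if_neg h4]
      have hge4 : (List.range L.length).countP
          (fun (i : Nat) => decide (4 ≤ vals.countP (fun v => decide ((i : Int) ≤ v)))) = 0 := by
        apply List.countP_eq_zero.mpr
        intro i _
        have := List.countP_le_length (l := vals) (p := fun v => decide ((i : Int) ≤ v))
        simp only [decide_eq_true_iff]
        omega
      rw [hge4]
      have e2 : 0 ≤ vals[2]'h2v := hv2.1
      omega
  · rw [if_neg h3]
    have hz : ∀ (c : Nat), 3 ≤ c → (List.range L.length).countP
        (fun (i : Nat) => decide (c ≤ vals.countP (fun v => decide ((i : Int) ≤ v)))) = 0 := by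
      intro c hc
      apply List.countP_eq_zero.mpr
      intro i _
      have := List.countP_le_length (l := vals) (p := fun v => decide ((i : Int) ≤ v))
      simp only [decide_eq_true_iff]
      omega
    rw [hz 3 (by omega), hz 4 (by omega)]
    simp

-- window predicate only depends on the prefix up to the right end
theorem winQ_append (l : List Char) (c : Char) (i j : Nat) (hi : i ≤ j) (hj : j < l.length) :
    winQ (l ++ [c]) i j = winQ l i j := by
  unfold winQ
  have hdrop : (l ++ [c]).drop i = l.drop i ++ [c] :=
    List.drop_append_of_le_length (by omega)
  have htake : (l.drop i ++ [c]).take (j + 1 - i) = (l.drop i).take (j + 1 - i) :=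
    List.take_append_of_le_length (by rw [List.length_drop]; omega)
  rw [hdrop, htake]

-- normal form for one B step
theorem bStep_eq (st : Int × PySem.Dict Char Int) (p : Int × Char) :
    bStep st p = (st.1 +
      (if 3 ≤ (st.2.insert p.2 p.1).size then
         PySem.List.pyGetD (PySem.List.sorted (st.2.insert p.2 p.1).values (fun v => v) true) 2 0 -
           (if 3 < (PySem.List.sorted (st.2.insert p.2 p.1).values (fun v => v) true).length then
              PySem.List.pyGetD (PySem.List.sorted (st.2.insert p.2 p.1).values (fun v => v) true) 3 0
            else -1)
       else 0), st.2.insert p.2 p.1) := by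
  simp only [bStep]
  split_ifs <;> simp

-- B's fold computes cntB and the last-occurrence dict
theorem bFold (l : List Char) :
    (PySem.List.enumerate l 0).foldl bStep (0, PySem.Dict.empty) =
      ((cntB l : Int), lastD l) := by
  induction l using List.reverseRecOn with
  | nil => simp [PySem.List.enumerate_nil, cntB, lastD]
  | append_singleton l c ih =>
    rw [PySem.List.enumerate_append, List.foldl_append, ih]
    simp only [PySem.List.enumerate_cons, PySem.List.enumerate_nil, zero_add,
      List.foldl_cons, List.foldl_nil]
    rw [bStep_eq]
    dsimp only
    rw [← lastD_append]
    have hcnt : cntB (l ++ [c]) = cntB l +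
        (List.range (l.length + 1)).countP (fun i => winQ (l ++ [c]) i l.length) := by
      unfold cntB
      have hL1 : (l ++ [c]).length = l.length + 1 := by simp
      rw [hL1, List.range_succ, List.map_append, List.sum_append]
      simp only [List.map_cons, List.map_nil, List.sum_cons, List.sum_nil, add_zero]
      congr 1
      · apply congrArg List.sum
        apply List.map_congr_left
        intro j hj
        apply countP_congr_mem
        intro i hi
        exact winQ_append l c i j (by have := List.mem_range.mp hi; omega)
          (List.mem_range.mp hj)
      · rw [List.range_succ]
    have hstep := step_core (l ++ [c]) (by simp)
    have hL1 : (l ++ [c]).length = l.length + 1 := by simp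
    have hL2 : (l ++ [c]).length - 1 = l.length := by simp
    rw [hL2, hL1] at hstep
    simp only [Prod.mk.injEq]
    refine ⟨?_, trivial⟩
    rw [hstep, hcnt]
    push_cast
    ring

theorem substring_count_brut_alt_eq_cntB (s : String) :
    substring_count_brut_alt s = (cntB s.toList : Int) := by
  unfold substring_count_brut_alt
  rw [bFold]

-- ---- A's side ----

theorem aInner_spec (cs : List Char) : ∀ (hm : PySem.Dict Char Int) (count : Int),
    hm.keys.Nodup →
    aInner cs hm count = count +
      (((List.range cs.length).countP
        (fun m => decide ((hm.keys.toFinset ∪ (cs.take (m + 1)).toFinset).card = 3))) : Int) := by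
  induction cs with
  | nil => intro hm count _; simp [aInner]
  | cons ch rest ih =>
    intro hm count hnd
    have hnd' : (hm.insert ch 1).keys.Nodup := PySem.Dict.nodup_keys_insert hm ch 1 hnd
    have hK' : (hm.insert ch 1).keys.toFinset = insert ch hm.keys.toFinset := by
      ext x
      simp [PySem.Dict.mem_keys_insert]
    have hsize : (hm.insert ch 1).size = (hm.insert ch 1).keys.toFinset.card := by
      rw [List.toFinset_card_of_nodup hnd']
      simp [PySem.Dict.size, PySem.Dict.keys]
    have hsets : ∀ (X : Finset Char),
        hm.keys.toFinset ∪ insert ch X = (hm.insert ch 1).keys.toFinset ∪ X := by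
      intro X; rw [hK']; ext x; simp
    have hRHS : (List.range (ch :: rest).length).countP
        (fun m => decide ((hm.keys.toFinset ∪ ((ch :: rest).take (m + 1)).toFinset).card = 3)) =
        (List.range rest.length).countP
          (fun m => decide (((hm.insert ch 1).keys.toFinset ∪ (rest.take (m + 1)).toFinset).card = 3)) +
        (if (hm.insert ch 1).keys.toFinset.card = 3 then 1 else 0) := by
      simp only [List.length_cons]
      rw [List.range_succ_eq_map, List.countP_cons, List.countP_map]
      congr 1
      · apply countP_congr_mem
        intro m _
        simp only [Function.comp_apply]
        have ht : (ch :: rest).take (Nat.succ m + 1) = ch :: rest.take (m + 1) :=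
          List.take_succ_cons
        rw [ht]
        simp only [List.toFinset_cons]
        rw [hsets]
      · have h0 : (ch :: rest).take (0 + 1) = [ch] := by simp
        rw [h0]
        simp only [List.toFinset_cons, List.toFinset_nil]
        rw [hsets, Finset.union_empty]
        simp
    simp only [aInner]
    split_ifs with h3 h4
    · rw [ih (hm.insert ch 1) (count + 1) hnd', hRHS]
      have hcard : (hm.insert ch 1).keys.toFinset.card = 3 := by
        rw [← hsize]; exact h3
      rw [if_pos hcard]
      push_cast
      ring
    · -- more than 3 distinct already: every later window has > 3 distinct characters
      have hcard : 3 < (hm.insert ch 1).keys.toFinset.card := by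
        rw [← hsize]; omega
      have hzero : (List.range rest.length).countP
          (fun m => decide (((hm.insert ch 1).keys.toFinset ∪ (rest.take (m + 1)).toFinset).card = 3)) = 0 := by
        apply List.countP_eq_zero.mpr
        intro m _
        simp only [decide_eq_true_iff]
        have := Finset.card_le_card
          (Finset.subset_union_left (s₁ := (hm.insert ch 1).keys.toFinset)
            (s₂ := (rest.take (m + 1)).toFinset))
        omega
      rw [hRHS, hzero, if_neg (by omega)]
      simp
    · rw [ih (hm.insert ch 1) count hnd', hRHS]
      have hcard : (hm.insert ch 1).keys.toFinset.card ≠ 3 := by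
        rw [← hsize]; exact h3
      rw [if_neg hcard]
      simp

theorem substring_count_brut_eq_cntA (s : String) :
    substring_count_brut s = (cntA s.toList : Int) := by
  unfold substring_count_brut
  rw [PySem.List.foldl_congr_mem _ _
      (fun count i => count + (((List.range (s.toList.length - i)).countP
        (fun m => winQ s.toList i (i + m))) : Int)) 0 ?_]
  · rw [PySem.List.foldl_add]
    unfold cntA
    rw [sum_map_natCast]
    simp
  · intro acc i hi
    rw [aInner_spec _ _ _ PySem.Dict.nodup_keys_empty]
    congr 1
    have hlen : (s.toList.drop i).length = s.toList.length - i := List.length_drop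
    rw [hlen]
    apply congrArg
    apply countP_congr_mem
    intro m _
    unfold winQ
    have hidx : i + m + 1 - i = m + 1 := by omega
    rw [hidx]
    simp [PySem.Dict.keys_empty]

-- ---- Fubini: group the same pairs by start (A) or by right end (B) ----

theorem fubini (P : Nat → Nat → Bool) (n : Nat) :
    ((List.range n).map (fun i => (List.range (n - i)).countP (fun m => P i (i + m)))).sum =
    ((List.range n).map (fun j => (List.range (j + 1)).countP (fun i => P i j))).sum := by
  induction n with
  | zero => rfl
  | succ n ih =>
    rw [List.range_succ, List.map_append, List.map_append, List.sum_append, List.sum_append]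
    simp only [List.map_cons, List.map_nil, List.sum_cons, List.sum_nil, add_zero]
    have hmc : (List.range n).map
        (fun i => (List.range (n + 1 - i)).countP (fun m => P i (i + m))) =
        (List.range n).map
          (fun i => (List.range (n - i)).countP (fun m => P i (i + m)) +
            (if P i n then 1 else 0)) := by
      apply List.map_congr_left
      intro i hi
      have hin : i < n := List.mem_range.mp hi
      have h1 : n + 1 - i = (n - i) + 1 := by omega
      rw [h1, List.range_succ, List.countP_append]
      have h2 : i + (n - i) = n := by omega
      simp [List.countP_cons, h2]
    rw [hmc, sum_map_add']
    have hlast : (List.range (n + 1 - n)).countP (fun m => P n (n + m)) =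
        if P n n then 1 else 0 := by
      have h1 : n + 1 - n = 1 := by omega
      rw [h1]
      simp [List.range_succ, List.countP_cons]
    have hR : (List.range (n + 1)).countP (fun i => P i n) =
        ((List.range n).map (fun i => if P i n then 1 else 0)).sum +
        (if P n n then 1 else 0) := by
      rw [List.range_succ, List.countP_append,
        countP_eq_sum_map (List.range n) (fun i => P i n)]
      simp [List.countP_cons]
    rw [hlast, hR, ih]
    omega

-- ===== VERDICT (by name: the statement is the Claim_ definition above) =====
theorem substring_count_brut_spec : Claim_equal_substring_count_brut := by
  intro s _
  unfold Spec_substring_count_brut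
  rw [substring_count_brut_eq_cntA, substring_count_brut_alt_eq_cntB]
  exact congrArg Nat.cast (fubini (winQ s.toList) s.toList.length)
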